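-- pv_equiv track=rewrite | github.com/EleneMorgoshia/GOAHOMEWORKS | Day014/homework/homework.py | digitize
-- ===== SOURCE A (Python) =====
-- def digitize(n):
--     str_number=str(n) #"195"
--     my_arr=[]
--     for number in str_number:
--         int_number=int(number)
--         my_arr.append(int_number)
--     my_arr.sort() #ზრდის მიხედვით დალაგება
--     my_arr.reverse() #უკუღმა დალაგება
--     return my_arr
-- ===== SOURCE B (Python) =====
-- def digitize(n):
--     # Counting sort by digit value: no comparison sort, no mutation of a sorted list.
--     digits = [int(ch) for ch in str(n)]
--     result = []
--     for d in range(9, -1, -1):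
--         result += [d] * digits.count(d)
--     return result
-- ===== Notes on version B (the rewrite author's own statement) =====
-- stated objective: alternative
-- what changed: Replaces per-char append + comparison sort + reverse by a counting strategy: collect the digits once, then emit each digit value from nine down to zero repeated digits.count(d) times (no .sort()/.reverse()).
import Mathlib
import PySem

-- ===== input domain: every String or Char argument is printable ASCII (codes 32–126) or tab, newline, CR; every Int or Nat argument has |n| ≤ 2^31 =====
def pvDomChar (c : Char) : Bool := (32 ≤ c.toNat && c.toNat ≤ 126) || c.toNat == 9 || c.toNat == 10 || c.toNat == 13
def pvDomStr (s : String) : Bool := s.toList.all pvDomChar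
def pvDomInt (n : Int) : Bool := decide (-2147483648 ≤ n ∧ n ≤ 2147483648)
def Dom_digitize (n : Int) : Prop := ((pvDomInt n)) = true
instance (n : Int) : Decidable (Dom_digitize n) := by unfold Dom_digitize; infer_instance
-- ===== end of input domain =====

-- B replaces A's comparison sort + reverse by counting: emit each digit value, highest first, repeated count(d) times (alternative algorithm, same cost here).

-- ===== PORT A =====
-- int(number) on a single char: PySem.Int.ofChars? [c]; none = ValueError (excluded by Pre_, so getD 0 is never the raising case inside Pre_).
def digitize (n : Int) : List Int :=
  let strNumber := PySem.Int.toChars n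
  let myArr := strNumber.foldl (fun acc number => acc ++ [(PySem.Int.ofChars? [number]).getD 0]) []
  (PySem.List.sorted myArr (fun x => x)).reverse

-- ===== PORT B =====
def digitize_alt (n : Int) : List Int :=
  let digits := (PySem.Int.toChars n).map (fun ch => (PySem.Int.ofChars? [ch]).getD 0)
  (PySem.List.pyRange 9 (-1) (-1)).foldl
    (fun result d => result ++ List.replicate (PySem.List.count digits d) d) []

-- ===== PRECONDITION & SPEC =====
-- Pre_ excludes negative n, on which both Pythons raise ValueError (int('-')); A returns on every n ≥ 0.
def Pre_digitize (n : Int) : Prop := 0 ≤ n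
instance (n : Int) : Decidable (Pre_digitize n) := by unfold Pre_digitize; infer_instance
def pvWitness_digitize : Int := (195)
def Spec_digitize (n : Int) (out : List Int) : Prop := out = digitize_alt n
instance (n : Int) (out : List Int) : Decidable (Spec_digitize n out) := by unfold Spec_digitize; infer_instance

-- ===== CLAIM (what is proved, stated in full; the proofs are below) =====
def Claim_equal_digitize : Prop := ∀ (n : Int), Dom_digitize n → Pre_digitize n → Spec_digitize n (digitize n)

-- ===== LEMMAS AND PROOFS =====

def pvDigitChars : List Char := ['0','1','2','3','4','5','6','7','8','9']

theorem pv_digitChar_mem (m : Nat) (h : m < 10) : m.digitChar ∈ pvDigitChars := by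
  interval_cases m <;> decide

theorem pv_mem_toDigitsCore (f : Nat) : ∀ (n : Nat) (acc : List Char) (c : Char),
    c ∈ Nat.toDigitsCore 10 f n acc → c ∈ acc ∨ c ∈ pvDigitChars := by
  induction f with
  | zero => intro n acc c h; exact Or.inl h
  | succ f ih =>
    intro n acc c h
    simp only [Nat.toDigitsCore] at h
    by_cases h0 : n / 10 = 0
    · rw [if_pos h0] at h
      rcases List.mem_cons.mp h with h1 | h1
      · exact Or.inr (h1 ▸ pv_digitChar_mem _ (Nat.mod_lt _ (by norm_num)))
      · exact Or.inl h1
    · rw [if_neg h0] at h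
      rcases ih _ _ _ h with h1 | h1
      · rcases List.mem_cons.mp h1 with h2 | h2
        · exact Or.inr (h2 ▸ pv_digitChar_mem _ (Nat.mod_lt _ (by norm_num)))
        · exact Or.inl h2
      · exact Or.inr h1

theorem pv_mem_toChars (n : Int) (hn : 0 ≤ n) (c : Char)
    (h : c ∈ PySem.Int.toChars n) : c ∈ pvDigitChars := by
  unfold PySem.Int.toChars at h
  rw [if_neg (by omega)] at h
  rcases pv_mem_toDigitsCore _ _ _ _ h with h1 | h1
  · exact absurd h1 (List.not_mem_nil)
  · exact h1

theorem pv_val_bounds (c : Char) (h : c ∈ pvDigitChars) :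
    0 ≤ (PySem.Int.ofChars? [c]).getD 0 ∧ (PySem.Int.ofChars? [c]).getD 0 < 10 := by
  fin_cases h <;> decide

theorem pv_count_flatMap_replicate (ds : List Int) :
    ∀ (r : List Int), r.Nodup → ∀ (a : Int),
    List.count a (r.flatMap fun d => List.replicate (List.count d ds) d)
      = if a ∈ r then List.count a ds else 0 := by
  intro r
  induction r with
  | nil => intro _ a; simp
  | cons d r ih =>
    intro hnd a
    rcases List.nodup_cons.mp hnd with ⟨hd, hr⟩
    rw [List.flatMap_cons, List.count_append, ih hr a, List.count_replicate]
    by_cases had : a = d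
    · subst had
      simp [if_neg hd]
    · simp [List.mem_cons, had, beq_iff_eq, Ne.symm had]

theorem pv_pairwise_flatMap_replicate (k : Int → Nat) :
    ∀ (r : List Int), r.Pairwise (· ≤ ·) →
    (r.flatMap fun d => List.replicate (k d) d).Pairwise (· ≤ ·) := by
  intro r
  induction r with
  | nil => intro _; simp
  | cons d r ih =>
    intro hp
    rcases List.pairwise_cons.mp hp with ⟨hle, hr⟩
    rw [List.flatMap_cons]
    rw [List.pairwise_append]
    refine ⟨?_, ih hr, ?_⟩
    · exact List.pairwise_replicate.mpr (Or.inr le_rfl)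
    · intro a ha b hb
      rcases List.mem_flatMap.mp hb with ⟨e, he, hb'⟩
      rw [List.eq_of_mem_replicate ha, List.eq_of_mem_replicate hb']
      exact hle e he

theorem pv_sorted_eq (ds : List Int) (hb : ∀ x ∈ ds, 0 ≤ x ∧ x < 10) :
    PySem.List.sorted ds (fun x => x)
      = (([0,1,2,3,4,5,6,7,8,9] : List Int)).flatMap
          (fun d => List.replicate (List.count d ds) d) := by
  apply PySem.List.sorted_id_eq_of_perm_of_pairwise
  · rw [List.perm_iff_count]
    intro a
    rw [pv_count_flatMap_replicate ds _ (by decide) a]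
    by_cases ha : a ∈ ([0,1,2,3,4,5,6,7,8,9] : List Int)
    · rw [if_pos ha]
    · rw [if_neg ha]
      symm
      rw [List.count_eq_zero]
      intro hmem
      rcases hb a hmem with ⟨h0, h1⟩
      apply ha
      simp only [List.mem_cons, List.not_mem_nil, or_false]
      omega
  · exact pv_pairwise_flatMap_replicate _ _ (by decide)

-- ===== VERDICT (by name: the statement is the Claim_ definition above) =====
theorem digitize_spec : Claim_equal_digitize := by
  intro n _ hpre
  unfold Spec_digitize digitize digitize_alt
  dsimp only
  rw [PySem.List.foldl_append_singleton_eq_map, List.nil_append]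
  set f : Char → Int := fun c => (PySem.Int.ofChars? [c]).getD 0 with hf
  set ds : List Int := (PySem.Int.toChars n).map f with hds
  have hb : ∀ x ∈ ds, 0 ≤ x ∧ x < 10 := by
    intro x hx
    rcases List.mem_map.mp hx with ⟨c, hc, rfl⟩
    exact pv_val_bounds c (pv_mem_toChars n hpre c hc)
  have hrange : PySem.List.pyRange 9 (-1) (-1) = ([9,8,7,6,5,4,3,2,1,0] : List Int) := by decide
  rw [hrange, PySem.List.foldl_append_eq_flatMap, List.nil_append]
  rw [pv_sorted_eq ds hb, List.reverse_flatMap]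
  simp only [Function.comp_def, List.reverse_replicate, PySem.List.count_eq]
  norm_num
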